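-- pv_equiv track=rewrite | github.com/cuzever/FlaskProject | weightingsystem/Database/DatabaseOperation.py | lostSigJudge
-- ===== SOURCE A (Python) =====
-- def lostSigJudge(dic):
--     dic_result = {}
--     for key, value in dic.items():
--         cnt = 0
--         for v in value:
--             if abs(v) == 0:
--                 cnt += 1
--             else:
--                 break
--         dic_result[key + '_lostSig'] = 1 if cnt == 5 else 0
--     return dic_result
-- ===== SOURCE B (Python) =====
-- def lostSigJudge(dic):
--     return {k + '_lostSig': int(v[:5] == [0, 0, 0, 0, 0] and (len(v) == 5 or v[5] != 0))
--             for k, v in dic.items()}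
-- ===== Notes on version B (the rewrite author's own statement) =====
-- stated objective: simpler
-- what changed: Replaces A's incremental count-leading-zeros-until-break loop per value by a fixed-window positional test (v[:5] == [0]*5 and (len(v)==5 or v[5]!=0)) inside a dict comprehension.
import Mathlib
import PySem

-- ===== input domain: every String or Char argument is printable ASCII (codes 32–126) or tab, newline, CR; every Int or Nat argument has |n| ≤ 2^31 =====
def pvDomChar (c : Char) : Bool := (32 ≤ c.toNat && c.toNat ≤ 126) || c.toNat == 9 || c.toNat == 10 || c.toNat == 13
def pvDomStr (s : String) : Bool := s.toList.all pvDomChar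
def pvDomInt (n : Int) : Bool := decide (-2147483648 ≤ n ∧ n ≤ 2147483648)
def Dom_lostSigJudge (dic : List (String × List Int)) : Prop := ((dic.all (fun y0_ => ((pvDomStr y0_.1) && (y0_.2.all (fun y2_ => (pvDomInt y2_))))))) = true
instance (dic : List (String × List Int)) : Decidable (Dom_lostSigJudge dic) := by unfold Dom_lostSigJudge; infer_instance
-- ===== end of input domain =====

-- B replaces A's count-leading-zeros-until-break loop by a fixed-window positional test
-- (v[:5] == [0]*5 and (len(v) == 5 or v[5] != 0)); objective: simpler.

-- ===== PORT A =====
-- A's inner 'for v in value: … break' loop, carrying the running count cnt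
def lostSigCount (value : List Int) (cnt : Int) : Int :=
  match value with
  | [] => cnt
  | v :: rest => if |v| = 0 then lostSigCount rest (cnt + 1) else cnt

def lostSigJudge (dic : List (String × List Int)) : List (String × Int) :=
  (dic.foldl
    (fun d kv => d.insert (kv.1 ++ "_lostSig") (if lostSigCount kv.2 0 = 5 then (1 : Int) else 0))
    PySem.Dict.empty).items

-- ===== PORT B =====
-- B's per-value flag: int(v[:5] == [0, 0, 0, 0, 0] and (len(v) == 5 or v[5] != 0))
def lostSigFlag (v : List Int) : Int :=
  if PySem.List.slice v (some 0) (some 5) = [0, 0, 0, 0, 0]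
      ∧ ((v.length : Int) = 5 ∨ PySem.List.pyGet? v 5 ≠ some 0) then 1 else 0

def lostSigJudge_alt (dic : List (String × List Int)) : List (String × Int) :=
  (dic.foldl
    (fun d kv => d.insert (kv.1 ++ "_lostSig") (lostSigFlag kv.2))
    PySem.Dict.empty).items

-- ===== PRECONDITION & SPEC =====
def Spec_lostSigJudge (dic : List (String × List Int)) (out : List (String × Int)) : Prop := out = lostSigJudge_alt dic
instance (dic : List (String × List Int)) (out : List (String × Int)) : Decidable (Spec_lostSigJudge dic out) := by unfold Spec_lostSigJudge; infer_instance

-- ===== CLAIM (what is proved, stated in full; the proofs are below) =====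
def Claim_equal_lostSigJudge : Prop := ∀ (dic : List (String × List Int)), Dom_lostSigJudge dic → Spec_lostSigJudge dic (lostSigJudge dic)

-- ===== LEMMAS AND PROOFS =====

-- number of leading zeros of a list (proof-side characterisation of A's inner loop)
def lzs : List Int → Nat
  | [] => 0
  | x :: xs => if x = 0 then lzs xs + 1 else 0

theorem lostSigCount_eq (v : List Int) : ∀ c : Int, lostSigCount v c = c + lzs v := by
  induction v with
  | nil => intro c; simp [lostSigCount, lzs]
  | cons x xs ih =>
      intro c
      simp only [lostSigCount, lzs, abs_eq_zero]
      split_ifs with h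
      · rw [ih]; push_cast; ring
      · simp

theorem lzs_char (v : List Int) : ∀ n : Nat,
    lzs v = n ↔ (v.take n = List.replicate n 0 ∧ (v.length = n ∨ v[n]? ≠ some (0 : Int))) := by
  induction v with
  | nil =>
      intro n
      cases n with
      | zero => simp [lzs]
      | succ m => simp [lzs]
  | cons x xs ih =>
      intro n
      cases n with
      | zero =>
          simp only [lzs, List.take_zero, List.replicate_zero, List.length_cons,
            List.getElem?_cons_zero, true_and]
          split_ifs with h
          · simp [h]
          · simp [h]
      | succ m =>
          simp only [lzs, List.take_succ_cons, List.replicate_succ, List.length_cons,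
            List.getElem?_cons_succ, List.cons.injEq]
          split_ifs with h
          · rw [Nat.add_right_cancel_iff, ih m]
            simp [h]
          · simp [h]

theorem flag_eq (v : List Int) :
    (if lostSigCount v 0 = 5 then (1 : Int) else 0) = lostSigFlag v := by
  have h1 : lostSigCount v 0 = (lzs v : Int) := by rw [lostSigCount_eq]; ring
  have hsl : PySem.List.slice v (some 0) (some 5) = v.take 5 := by simp [pysem]
  have hg : PySem.List.pyGet? v 5 = v[5]? := by simp [pysem]
  have h2 : lostSigFlag v = if lzs v = 5 then 1 else 0 := by
    rw [lostSigFlag, hsl, hg]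
    refine if_congr ?_ rfl rfl
    rw [lzs_char v 5]
    constructor
    · rintro ⟨hs, ht⟩
      exact ⟨hs, ht.imp (fun h => by exact_mod_cast h) id⟩
    · rintro ⟨hs, ht⟩
      exact ⟨hs, ht.imp (fun h => by exact_mod_cast h) id⟩
  rw [h1, h2]
  split_ifs with ha hb hb
  · rfl
  · exact absurd (by exact_mod_cast ha) hb
  · exact absurd (by exact_mod_cast hb) ha
  · rfl

-- ===== VERDICT (by name: the statement is the Claim_ definition above) =====
theorem lostSigJudge_spec : Claim_equal_lostSigJudge := by
  intro dic _
  unfold Spec_lostSigJudge lostSigJudge lostSigJudge_alt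
  have hfun :
      (fun (d : PySem.Dict String Int) (kv : String × List Int) =>
          d.insert (kv.1 ++ "_lostSig") (if lostSigCount kv.2 0 = 5 then (1 : Int) else 0))
        = (fun (d : PySem.Dict String Int) (kv : String × List Int) =>
            d.insert (kv.1 ++ "_lostSig") (lostSigFlag kv.2)) := by
    funext d kv
    rw [flag_eq]
  rw [hfun]
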